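-- pv_equiv track=rewrite | github.com/johlun99/AoC-2022 | day18/solution.py | compareAdj
-- ===== SOURCE A (Python) =====
-- def compareAdj(c1, c2):
--     countSame = 0
--     for s in range(3):
--         if c1[s] == c2[s]:
--             countSame += 1
--
--         elif c1[s] < c2[s] - 1 or c1[s] > c2[s] + 1:
--             return 0
--
--     if countSame == 2:
--         return 1
--
--     return 0
-- ===== SOURCE B (Python) =====
-- def compareAdj(c1, c2):
--     d = sum(abs(c1[s] - c2[s]) for s in range(3))
--     return 1 if d == 1 else 0
-- ===== Notes on version B (the rewrite author's own statement) =====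
-- stated objective: simpler
-- what changed: Replaces the per-axis equality counting with early exit and the countSame==2 test by a single Manhattan-distance computation: return 1 iff sum of |c1[s]-c2[s]| equals 1.
import Mathlib
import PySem

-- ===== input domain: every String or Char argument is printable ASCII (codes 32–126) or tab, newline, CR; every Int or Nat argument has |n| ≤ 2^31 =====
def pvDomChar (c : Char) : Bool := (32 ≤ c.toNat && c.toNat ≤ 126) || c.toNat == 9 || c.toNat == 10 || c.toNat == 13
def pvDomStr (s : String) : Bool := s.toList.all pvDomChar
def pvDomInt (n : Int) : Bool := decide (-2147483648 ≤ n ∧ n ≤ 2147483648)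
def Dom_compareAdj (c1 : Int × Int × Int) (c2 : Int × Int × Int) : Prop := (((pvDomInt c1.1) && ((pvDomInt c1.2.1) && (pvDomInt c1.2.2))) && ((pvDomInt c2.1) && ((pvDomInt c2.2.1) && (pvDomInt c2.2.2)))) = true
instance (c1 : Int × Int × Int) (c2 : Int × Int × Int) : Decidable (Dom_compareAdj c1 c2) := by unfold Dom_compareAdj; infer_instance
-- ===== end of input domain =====

-- B replaces A's equality-counting loop with early exit by a single Manhattan-distance test (simpler).

-- ===== PORT A =====
def compareAdjLoop (pairs : List (Int × Int)) (countSame : Int) : Int :=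
  match pairs with
  | [] => if countSame == 2 then 1 else 0
  | (a, b) :: rest =>
    if a == b then compareAdjLoop rest (countSame + 1)
    else if a < b - 1 ∨ a > b + 1 then 0
    else compareAdjLoop rest countSame

def compareAdj (c1 : Int × Int × Int) (c2 : Int × Int × Int) : Int :=
  compareAdjLoop [(c1.1, c2.1), (c1.2.1, c2.2.1), (c1.2.2, c2.2.2)] 0

-- ===== PORT B =====
def compareAdj_alt (c1 : Int × Int × Int) (c2 : Int × Int × Int) : Int :=
  let d := |c1.1 - c2.1| + |c1.2.1 - c2.2.1| + |c1.2.2 - c2.2.2|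
  if d == 1 then 1 else 0

-- ===== PRECONDITION & SPEC =====
def Spec_compareAdj (c1 : Int × Int × Int) (c2 : Int × Int × Int) (out : Int) : Prop := out = compareAdj_alt c1 c2
instance (c1 : Int × Int × Int) (c2 : Int × Int × Int) (out : Int) : Decidable (Spec_compareAdj c1 c2 out) := by unfold Spec_compareAdj; infer_instance

-- ===== CLAIM (what is proved, stated in full; the proofs are below) =====
def Claim_equal_compareAdj : Prop := ∀ (c1 : Int × Int × Int) (c2 : Int × Int × Int), Dom_compareAdj c1 c2 → Spec_compareAdj c1 c2 (compareAdj c1 c2)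

-- ===== LEMMAS AND PROOFS =====

-- ===== VERDICT (by name: the statement is the Claim_ definition above) =====
theorem compareAdj_spec : Claim_equal_compareAdj := by
  intro c1 c2 _
  obtain ⟨a1, b1, d1⟩ := c1
  obtain ⟨a2, b2, d2⟩ := c2
  unfold Spec_compareAdj compareAdj compareAdj_alt
  simp only [compareAdjLoop, beq_iff_eq, Int.abs_eq_natAbs]
  split_ifs <;> omega
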